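-- pv_equiv track=rewrite | github.com/jedimud/jtin | scratch/wiki_map_list.py | key_exists
-- ===== SOURCE A (Python) =====
-- def key_exists(key, dictionary):
--     key_parts = key.split()
--     for i in range(1, len(key_parts) + 1):
--         partial_key = ' '.join(key_parts[:i])
--         for existing_key in dictionary:
--             if partial_key == existing_key and " - " in key:
--                 return True, partial_key
--     return False, None
-- ===== SOURCE B (Python) =====
-- def key_exists(key, dictionary):
--     if " - " not in key:
--         return False, None
--     key_parts = key.split()
--     best = None  # (n, matching_key) with the smallest word count n
--     for existing_key in dictionary:
--         n = len(existing_key.split())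
--         if 1 <= n <= len(key_parts) and ' '.join(key_parts[:n]) == existing_key:
--             if best is None or n < best[0]:
--                 best = (n, existing_key)
--     if best is None:
--         return False, None
--     return True, best[1]
-- ===== Notes on version B (the rewrite author's own statement) =====
-- stated objective: alternative
-- what changed: B checks the ' - ' guard once up front and scans the dictionary a single time, keeping the matching key with the smallest word count, instead of A's rebuilding every prefix join and rescanning the whole dictionary for each prefix length.
import Mathlib
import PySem

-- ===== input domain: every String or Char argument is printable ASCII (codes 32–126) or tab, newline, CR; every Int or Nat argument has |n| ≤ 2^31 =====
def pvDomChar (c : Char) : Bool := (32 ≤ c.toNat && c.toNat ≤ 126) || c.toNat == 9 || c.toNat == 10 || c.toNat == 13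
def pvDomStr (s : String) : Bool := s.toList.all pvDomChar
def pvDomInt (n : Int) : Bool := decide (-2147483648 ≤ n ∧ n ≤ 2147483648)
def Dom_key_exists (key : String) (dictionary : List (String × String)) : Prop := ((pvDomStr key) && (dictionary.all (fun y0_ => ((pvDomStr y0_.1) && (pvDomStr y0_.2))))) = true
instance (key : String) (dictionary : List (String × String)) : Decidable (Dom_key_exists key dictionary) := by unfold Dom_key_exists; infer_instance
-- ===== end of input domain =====

-- B scans the dictionary once (computing each key's word count) instead of scanning it once per key prefix; return values are identical.

-- ===== PORT A =====
-- inner loop: 'for existing_key in dictionary: if partial_key == existing_key and " - " in key: return True, partial_key'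
def keyExistsInner (partial_key : String) (key : String) : List (String × String) → Option (Bool × String)
  | [] => none
  | (existing_key, _) :: rest =>
    if partial_key = existing_key ∧ PySem.Str.isIn " - " key = true then some (true, partial_key)
    else keyExistsInner partial_key key rest

-- outer loop: 'for i in range(1, len(key_parts) + 1): partial_key = " ".join(key_parts[:i]); <inner>'
def keyExistsOuter (key : String) (key_parts : List String) (dictionary : List (String × String)) : List Int → Bool × Option String
  | [] => (false, none)
  | i :: is =>
    let partial_key := PySem.Str.join " " (PySem.List.slice key_parts none (some i))
    match keyExistsInner partial_key key dictionary with
    | some r => (r.1, some r.2)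
    | none => keyExistsOuter key key_parts dictionary is

def key_exists (key : String) (dictionary : List (String × String)) : Bool × Option String :=
  let key_parts := PySem.Str.split₀ key
  keyExistsOuter key key_parts dictionary (PySem.List.pyRange 1 ((key_parts.length : Int) + 1) 1)

-- ===== PORT B =====
-- single pass over the dictionary keeping the candidate with the smallest word count n
def keBestStep (key_parts : List String) (best : Option (Int × String)) (existing_key : String) : Option (Int × String) :=
  let n : Int := ((PySem.Str.split₀ existing_key).length : Int)
  if 1 ≤ n ∧ n ≤ (key_parts.length : Int) ∧
      PySem.Str.join " " (PySem.List.slice key_parts none (some n)) = existing_key then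
    match best with
    | none => some (n, existing_key)
    | some (m, s) => if n < m then some (n, existing_key) else some (m, s)
  else best

def keBestFold (key_parts : List String) (best : Option (Int × String)) : List (String × String) → Option (Int × String)
  | [] => best
  | (existing_key, _) :: rest => keBestFold key_parts (keBestStep key_parts best existing_key) rest

def key_exists_alt (key : String) (dictionary : List (String × String)) : Bool × Option String :=
  if PySem.Str.isIn " - " key = false then (false, none)
  else
    let key_parts := PySem.Str.split₀ key
    match keBestFold key_parts none dictionary with
    | none => (false, none)
    | some (_, s) => (true, some s)

-- ===== PRECONDITION & SPEC =====
def Spec_key_exists (key : String) (dictionary : List (String × String)) (out : Bool × Option String) : Prop := out = key_exists_alt key dictionary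
instance (key : String) (dictionary : List (String × String)) (out : Bool × Option String) : Decidable (Spec_key_exists key dictionary out) := by unfold Spec_key_exists; infer_instance

-- ===== CLAIM (what is proved, stated in full; the proofs are below) =====
def Claim_equal_key_exists : Prop := ∀ (key : String) (dictionary : List (String × String)), Dom_key_exists key dictionary → Spec_key_exists key dictionary (key_exists key dictionary)

-- ===== LEMMAS AND PROOFS =====

-- go-level equations of PySem.Chars.split₀
theorem goNil (cur : List Char) (acc : List (List Char)) :
    PySem.Chars.split₀.go [] cur acc = if cur.isEmpty then acc.reverse else (cur.reverse :: acc).reverse := by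
  rw [PySem.Chars.split₀.go.eq_def]

theorem goSpace {c : Char} (h : PySem.Chars.isspace c = true) (rest cur : List Char) (acc : List (List Char)) :
    PySem.Chars.split₀.go (c :: rest) cur acc =
      if cur.isEmpty then PySem.Chars.split₀.go rest [] acc
      else PySem.Chars.split₀.go rest [] (cur.reverse :: acc) := by
  rw [PySem.Chars.split₀.go.eq_def]; simp [h]

theorem goWord {c : Char} (h : PySem.Chars.isspace c = false) (rest cur : List Char) (acc : List (List Char)) :
    PySem.Chars.split₀.go (c :: rest) cur acc = PySem.Chars.split₀.go rest (c :: cur) acc := by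
  rw [PySem.Chars.split₀.go.eq_def]; simp [h]

-- every word produced by split₀ is nonempty and whitespace-free
theorem goParts : ∀ (cs cur : List Char) (acc : List (List Char)),
    (∀ c ∈ cur, PySem.Chars.isspace c = false) →
    (∀ p ∈ acc, p ≠ [] ∧ ∀ c ∈ p, PySem.Chars.isspace c = false) →
    ∀ p ∈ PySem.Chars.split₀.go cs cur acc, p ≠ [] ∧ ∀ c ∈ p, PySem.Chars.isspace c = false := by
  intro cs
  induction cs with
  | nil =>
    intro cur acc hcur hacc p hp
    rw [goNil] at hp
    split_ifs at hp with hce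
    · exact hacc p (by simpa using hp)
    · rw [List.mem_reverse, List.mem_cons] at hp
      rcases hp with rfl | hp
      · refine ⟨by simpa [List.isEmpty_iff] using hce, ?_⟩
        intro c hc; exact hcur c (List.mem_reverse.mp hc)
      · exact hacc p hp
  | cons c rest ih =>
    intro cur acc hcur hacc p hp
    by_cases hc : PySem.Chars.isspace c = true
    · rw [goSpace hc] at hp
      split_ifs at hp with hce
      · exact ih [] acc (by simp) hacc p hp
      · refine ih [] (cur.reverse :: acc) (by simp) ?_ p hp
        intro q hq
        rcases List.mem_cons.mp hq with rfl | hq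
        · exact ⟨by simpa [List.isEmpty_iff] using hce,
            fun d hd => hcur d (List.mem_reverse.mp hd)⟩
        · exact hacc q hq
    · rw [goWord (by simpa using hc)] at hp
      refine ih (c :: cur) acc ?_ hacc p hp
      intro d hd
      rcases List.mem_cons.mp hd with rfl | hd
      · simpa using hc
      · exact hcur d hd

theorem split₀_parts (cs : List Char) :
    ∀ p ∈ PySem.Chars.split₀ cs, p ≠ [] ∧ ∀ c ∈ p, PySem.Chars.isspace c = false := by
  intro p hp
  exact goParts cs [] [] (by simp) (by simp) p hp

-- consuming a whitespace-free word
theorem goConsume : ∀ (p rest cur : List Char) (acc : List (List Char)), (∀ c ∈ p, PySem.Chars.isspace c = false) →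
    PySem.Chars.split₀.go (p ++ rest) cur acc = PySem.Chars.split₀.go rest (p.reverse ++ cur) acc := by
  intro p
  induction p with
  | nil => intro rest cur acc _; simp
  | cons c p ih =>
    intro rest cur acc hp
    have hc : PySem.Chars.isspace c = false := hp c (by simp)
    rw [List.cons_append, goWord hc, ih rest (c :: cur) acc (fun d hd => hp d (by simp [hd]))]
    simp

-- split is a left inverse of join on lists of nonempty whitespace-free words
theorem goJoin : ∀ (ps : List (List Char)) (acc : List (List Char)), ps ≠ [] →
    (∀ p ∈ ps, p ≠ [] ∧ ∀ c ∈ p, PySem.Chars.isspace c = false) →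
    PySem.Chars.split₀.go (List.intercalate [' '] ps) [] acc = acc.reverse ++ ps := by
  intro ps
  induction ps with
  | nil => intro acc h; exact absurd rfl h
  | cons p ps ih =>
    intro acc _ hp
    have hpne : p ≠ [] := (hp p (by simp)).1
    have hpw : ∀ c ∈ p, PySem.Chars.isspace c = false := (hp p (by simp)).2
    cases ps with
    | nil =>
      have : List.intercalate [' '] [p] = p ++ [] := by simp [List.intercalate]
      rw [this, goConsume p [] [] acc hpw, goNil]
      have : (p.reverse ++ []).isEmpty = false := by
        simpa [List.isEmpty_iff] using hpne
      rw [this]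
      simp
    | cons q qs =>
      have hint : List.intercalate [' '] (p :: q :: qs) =
          p ++ (' ' :: List.intercalate [' '] (q :: qs)) := by
        simp [List.intercalate, List.intersperse]
      rw [hint, goConsume p _ [] acc hpw,
        goSpace (by decide) _ _ acc]
      have : (p.reverse ++ []).isEmpty = false := by
        simpa [List.isEmpty_iff] using hpne
      rw [this]
      have := ih ((p.reverse ++ []).reverse :: acc) (by simp)
        (fun r hr => hp r (by simp [hr]))
      rw [this]
      simp

theorem split₀_join (ps : List (List Char)) (hne : ps ≠ [])
    (hp : ∀ p ∈ ps, p ≠ [] ∧ ∀ c ∈ p, PySem.Chars.isspace c = false) :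
    PySem.Chars.split₀ (PySem.Chars.join [' '] ps) = ps := by
  have : PySem.Chars.join [' '] ps = List.intercalate [' '] ps := rfl
  show PySem.Chars.split₀.go (PySem.Chars.join [' '] ps) [] [] = ps
  rw [this, goJoin ps [] hne hp]
  simp

-- string-level roundtrip: the m-word prefix of key splits back into m words
theorem len_split_prefix (key : String) (m : Nat) (h1 : 1 ≤ m) (h2 : m ≤ (PySem.Str.split₀ key).length) :
    (PySem.Str.split₀ (PySem.Str.join " " ((PySem.Str.split₀ key).take m))).length = m := by
  have hLen : (PySem.Chars.split₀ key.toList).length = (PySem.Str.split₀ key).length := by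
    rw [← PySem.Str.split₀_map_toList, List.length_map]
  have hto : (PySem.Str.join " " ((PySem.Str.split₀ key).take m)).toList =
      PySem.Chars.join [' '] ((PySem.Chars.split₀ key.toList).take m) := by
    rw [PySem.Str.toList_join, List.map_take, PySem.Str.split₀_map_toList]; rfl
  have hne : (PySem.Chars.split₀ key.toList).take m ≠ [] := by
    intro h
    have hl := congrArg List.length h
    rw [List.length_take] at hl
    simp only [List.length_nil] at hl
    omega
  have hrt : PySem.Chars.split₀ (PySem.Chars.join [' '] ((PySem.Chars.split₀ key.toList).take m)) =
      (PySem.Chars.split₀ key.toList).take m :=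
    split₀_join _ hne (fun p hp => split₀_parts key.toList p (List.mem_of_mem_take hp))
  have := congrArg List.length (PySem.Str.split₀_map_toList (PySem.Str.join " " ((PySem.Str.split₀ key).take m)))
  rw [List.length_map, hto, hrt, List.length_take] at this
  omega

-- characterizing A's inner loop
theorem inner_char (p key : String) (d : List (String × String)) :
    keyExistsInner p key d =
      if PySem.Str.isIn " - " key = true ∧ p ∈ d.map Prod.fst then some (true, p) else none := by
  induction d with
  | nil => simp [keyExistsInner]
  | cons kv rest ih =>
    obtain ⟨k, v⟩ := kv
    rw [keyExistsInner, ih]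
    simp only [List.map_cons, List.mem_cons]
    by_cases hk : p = k
    · subst hk
      by_cases hs : PySem.Str.isIn " - " key = true
      · rw [if_pos ⟨rfl, hs⟩, if_pos ⟨hs, Or.inl rfl⟩]
      · rw [if_neg (fun h => hs h.2), if_neg (fun h => hs h.1), if_neg (fun h => hs h.1)]
    · rw [if_neg (fun h => hk h.1)]
      have he : (PySem.Str.isIn " - " key = true ∧ p ∈ rest.map Prod.fst) ↔
          (PySem.Str.isIn " - " key = true ∧ (p = k ∨ p ∈ rest.map Prod.fst)) := by
        constructor
        · rintro ⟨a, b⟩; exact ⟨a, Or.inr b⟩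
        · rintro ⟨a, b⟩; exact ⟨a, b.resolve_left hk⟩
      rw [if_congr he rfl rfl]

-- characterizing A's outer loop (when the " - " guard holds)
theorem outer_char (key : String) (kp : List String) (d : List (String × String))
    (hsep : PySem.Str.isIn " - " key = true) : ∀ is : List Int,
    keyExistsOuter key kp d is =
      match is.find? (fun i => decide ((PySem.Str.join " " (PySem.List.slice kp none (some i))) ∈ d.map Prod.fst)) with
      | some i => (true, some (PySem.Str.join " " (PySem.List.slice kp none (some i))))
      | none => (false, none) := by
  intro is
  induction is with
  | nil => simp [keyExistsOuter]
  | cons i is ih =>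
    rw [keyExistsOuter, inner_char]
    by_cases hm : (PySem.Str.join " " (PySem.List.slice kp none (some i))) ∈ d.map Prod.fst
    · rw [if_pos ⟨hsep, hm⟩, List.find?_cons_of_pos (by simpa using hm)]
    · rw [if_neg (fun h => hm h.2), List.find?_cons_of_neg (by simpa using hm), ih]

theorem range_eq (L : Nat) :
    PySem.List.pyRange 1 ((L : Int) + 1) 1 = (List.range L).map (fun (k : Nat) => ((k : Int) + 1)) := by
  rw [PySem.List.pyRange_of_pos 1 ((L : Int) + 1) (by norm_num)]
  rcases Nat.eq_zero_or_pos L with h | h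
  · subst h
    rw [if_neg (by omega)]
    simp
  · rw [if_pos (by omega)]
    have h2 : (((L : Int) + 1 - 1 + 1 - 1) / 1).toNat = L := by omega
    rw [h2]
    apply List.map_congr_left
    intro k _
    omega

-- minimum-tracking fold
def fmin (o : Option Int) : List Int → Option Int
  | [] => o
  | n :: l => fmin (match o with | none => some n | some m => if n < m then some n else some m) l

def candN (kp : List String) (ek : String) : Option Int :=
  let n : Int := ((PySem.Str.split₀ ek).length : Int)
  if 1 ≤ n ∧ n ≤ (kp.length : Int) ∧ PySem.Str.join " " (PySem.List.slice kp none (some n)) = ek then some n else none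

theorem fmin_cons (o : Option Int) (n : Int) (l : List Int) :
    fmin o (n :: l) = fmin (match o with | none => some n | some m => if n < m then some n else some m) l := rfl

theorem fold_char (kp : List String) : ∀ (d : List (String × String)) (best : Option (Int × String)),
    (∀ m s, best = some (m, s) → s = PySem.Str.join " " (PySem.List.slice kp none (some m))) →
    keBestFold kp best d =
      (fmin (best.map Prod.fst) (d.filterMap (fun kv => candN kp kv.1))).map
        (fun n => (n, PySem.Str.join " " (PySem.List.slice kp none (some n)))) := by
  intro d
  induction d with
  | nil =>
    intro best hinv
    cases best with
    | none => rfl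
    | some p =>
      obtain ⟨m, s⟩ := p
      simp only [keBestFold, fmin, List.filterMap_nil, Option.map_some]
      rw [hinv m s rfl]
  | cons kv rest ih =>
    obtain ⟨k, v⟩ := kv
    intro best hinv
    rw [keBestFold, List.filterMap_cons]
    by_cases hc : 1 ≤ ((PySem.Str.split₀ k).length : Int) ∧
        ((PySem.Str.split₀ k).length : Int) ≤ (kp.length : Int) ∧
        PySem.Str.join " " (PySem.List.slice kp none (some ((PySem.Str.split₀ k).length : Int))) = k
    · have hcand : candN kp k = some ((PySem.Str.split₀ k).length : Int) := by
        unfold candN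
        rw [if_pos hc]
      rw [hcand, fmin_cons]
      cases best with
      | none =>
        have hstep : keBestStep kp none k = some (((PySem.Str.split₀ k).length : Int), k) := by
          unfold keBestStep
          rw [if_pos hc]
        rw [hstep, ih _ (fun m s hms => by
          injection hms with h; injection h with h1 h2; subst h1; subst h2; exact hc.2.2.symm)]
        rfl
      | some p =>
        obtain ⟨m, s⟩ := p
        by_cases hlt : ((PySem.Str.split₀ k).length : Int) < m
        · have hstep : keBestStep kp (some (m, s)) k = some (((PySem.Str.split₀ k).length : Int), k) := by
            unfold keBestStep
            rw [if_pos hc]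
            exact if_pos hlt
          rw [hstep, ih _ (fun m' s' hms => by
            injection hms with h; injection h with h1 h2; subst h1; subst h2; exact hc.2.2.symm)]
          simp only [Option.map_some, if_pos hlt]
        · have hstep : keBestStep kp (some (m, s)) k = some (m, s) := by
            unfold keBestStep
            rw [if_pos hc]
            exact if_neg hlt
          rw [hstep, ih _ (fun m' s' hms => by
            injection hms with h; injection h with h1 h2; subst h1; subst h2; exact hinv m s rfl)]
          simp only [Option.map_some, if_neg hlt]
    · have hcand : candN kp k = none := by
        unfold candN
        rw [if_neg hc]
      have hstep : keBestStep kp best k = best := by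
        unfold keBestStep
        rw [if_neg hc]
      rw [hcand, hstep, ih best hinv]

theorem fmin_min (i₀ : Int) : ∀ (l : List Int) (o : Option Int),
    (∀ n ∈ l, i₀ ≤ n) → (i₀ ∈ l ∨ o = some i₀) → (∀ m, o = some m → i₀ ≤ m) →
    fmin o l = some i₀ := by
  intro l
  induction l with
  | nil =>
    intro o _ hmem _
    rcases hmem with h | rfl
    · exact absurd h (List.not_mem_nil)
    · rfl
  | cons n l ih =>
    intro o hle hmem ho
    rw [fmin_cons]
    have hn : i₀ ≤ n := hle n (by simp)
    have hle' : ∀ q ∈ l, i₀ ≤ q := fun q hq => hle q (by simp [hq])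
    cases o with
    | none =>
      rcases hmem with h | h
      · rcases List.mem_cons.mp h with rfl | h
        · exact ih (some i₀) hle' (Or.inr rfl) (fun q hq => by injection hq with hq; omega)
        · exact ih (some n) hle' (Or.inl h) (fun q hq => by injection hq with hq; omega)
      · exact absurd h (by simp)
    | some m =>
      have him : i₀ ≤ m := ho m rfl
      have hred : (match some m with | none => some n | some m => if n < m then some n else some m)
          = if n < m then some n else some m := rfl
      rw [hred]
      by_cases hnm : n < m
      · rw [if_pos hnm]
        rcases hmem with h | h
        · rcases List.mem_cons.mp h with rfl | h
          · exact ih (some i₀) hle' (Or.inr rfl) (fun q hq => by injection hq with hq; omega)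
          · exact ih (some n) hle' (Or.inl h) (fun q hq => by injection hq with hq; omega)
        · injection h with h
          exact absurd hnm (by omega)
      · rw [if_neg hnm]
        rcases hmem with h | h
        · rcases List.mem_cons.mp h with rfl | h
          · rw [show m = i₀ by omega]
            exact ih (some i₀) hle' (Or.inr rfl) (fun q hq => by injection hq with hq; omega)
          · exact ih (some m) hle' (Or.inl h) (fun q hq => by injection hq with hq; omega)
        · exact ih (some m) hle' (Or.inr h) (fun q hq => by injection hq with hq; omega)

theorem outer_noSep (key : String) (kp : List String) (d : List (String × String))
    (h : PySem.Str.isIn " - " key = false) : ∀ is : List Int, keyExistsOuter key kp d is = (false, none) := by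
  intro is
  induction is with
  | nil => rfl
  | cons i is ih =>
    rw [keyExistsOuter, inner_char, if_neg (fun hc => by rw [hc.1] at h; cases h)]
    exact ih

-- ===== VERDICT (by name: the statement is the Claim_ definition above) =====
theorem key_exists_spec : Claim_equal_key_exists := by
  intro key dictionary _
  unfold Spec_key_exists
  by_cases hsep : PySem.Str.isIn " - " key = true
  · have hnotfalse : ¬ (PySem.Str.isIn " - " key = false) := by
      rw [hsep]; exact fun h => Bool.noConfusion h
    unfold key_exists
    rw [outer_char key (PySem.Str.split₀ key) dictionary hsep,
      range_eq (PySem.Str.split₀ key).length, List.find?_map]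
    have hfun : ((fun i => decide ((PySem.Str.join " " (PySem.List.slice (PySem.Str.split₀ key) none (some i))) ∈ dictionary.map Prod.fst)) ∘ (fun (k : Nat) => ((k : Int) + 1))) =
        (fun (k : Nat) => decide ((PySem.Str.join " " ((PySem.Str.split₀ key).take (k + 1))) ∈ dictionary.map Prod.fst)) := by
      funext k
      simp only [Function.comp_apply]
      rw [PySem.List.slice_to _ (by omega), show ((k : Int) + 1).toNat = k + 1 by omega]
    rw [hfun]
    set kp := PySem.Str.split₀ key with hkp
    set L := kp.length with hL
    set q : Nat → Bool := fun k => decide ((PySem.Str.join " " (kp.take (k + 1))) ∈ dictionary.map Prod.fst) with hq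
    cases hfind : List.find? q (List.range L) with
    | none =>
      have hall := List.find?_eq_none.mp hfind
      have hns : dictionary.filterMap (fun kv => candN kp kv.1) = [] := by
        rw [List.filterMap_eq_nil_iff]
        intro kv hkv
        unfold candN
        rw [if_neg]
        rintro ⟨h1, h2, h3⟩
        have hl1 : 1 ≤ (PySem.Str.split₀ kv.1).length := by exact_mod_cast h1
        have hl2 : (PySem.Str.split₀ kv.1).length ≤ L := by exact_mod_cast h2
        obtain ⟨k, hkeq⟩ : ∃ k : Nat, (PySem.Str.split₀ kv.1).length = k + 1 :=
          ⟨(PySem.Str.split₀ kv.1).length - 1, by omega⟩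
        apply hall k (List.mem_range.mpr (by omega))
        rw [show ((PySem.Str.split₀ kv.1).length : Int) = ((k : Int) + 1) by omega,
          PySem.List.slice_to _ (by omega), show ((k : Int) + 1).toNat = k + 1 by omega] at h3
        exact decide_eq_true (h3 ▸ List.mem_map.mpr ⟨kv, hkv, rfl⟩)
      have halt : key_exists_alt key dictionary = (false, none) := by
        unfold key_exists_alt
        rw [if_neg hnotfalse]
        show (match keBestFold kp none dictionary with
          | none => (false, none)
          | some (_, s) => (true, some s)) = (false, none)
        rw [fold_char kp dictionary none (fun m s h => by cases h), hns]
        rfl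
      rw [halt]
      rfl
    | some k₀ =>
      obtain ⟨hqk₀, as, bs, hsplit, hprev⟩ := List.find?_eq_some_iff_append.mp hfind
      have hLlen : L = as.length + bs.length + 1 := by
        have := congrArg List.length hsplit
        simpa using this
      have hk₀ : k₀ = as.length := by
        have h1 : (List.range L)[as.length]? = some k₀ := by
          rw [hsplit, List.getElem?_append_right (le_refl as.length)]
          simp
        rw [List.getElem?_range (by omega)] at h1
        exact (Option.some_inj.mp h1).symm
      have hk₀L : k₀ < L := by omega
      have hprev' : ∀ j, j < k₀ → q j = false := by
        intro j hj
        have has : as = List.range as.length := by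
          have h := congrArg (List.take as.length) hsplit
          rw [List.take_left, List.take_range, Nat.min_eq_left (by omega)] at h
          exact h.symm
        have hjas : j ∈ as := by
          rw [has]
          exact List.mem_range.mpr (by omega)
        simpa using hprev j hjas
      have hmemkeys : PySem.Str.join " " (kp.take (k₀ + 1)) ∈ dictionary.map Prod.fst :=
        of_decide_eq_true hqk₀
      obtain ⟨kv, hkv, hkveq⟩ := List.mem_map.mp hmemkeys
      have hlenkv : (PySem.Str.split₀ kv.1).length = k₀ + 1 := by
        rw [hkveq]
        exact len_split_prefix key (k₀ + 1) (by omega) (by rw [← hkp]; omega)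
      have hcand : candN kp kv.1 = some ((k₀ : Int) + 1) := by
        unfold candN
        rw [show ((PySem.Str.split₀ kv.1).length : Int) = ((k₀ : Int) + 1) by omega,
          if_pos ⟨by omega, by omega, by
            rw [PySem.List.slice_to _ (by omega), show ((k₀ : Int) + 1).toNat = k₀ + 1 by omega]
            exact hkveq.symm⟩]
      have hmin : fmin none (dictionary.filterMap (fun kv => candN kp kv.1)) = some ((k₀ : Int) + 1) := by
        apply fmin_min
        · intro n hn
          obtain ⟨kv', hkv', hcand'⟩ := List.mem_filterMap.mp hn
          simp only [candN] at hcand'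
          split_ifs at hcand' with hcond
          · obtain ⟨h1, h2, h3⟩ := hcond
            injection hcand' with hn'
            subst hn'
            by_contra hlt
            have hl1 : 1 ≤ (PySem.Str.split₀ kv'.1).length := by exact_mod_cast h1
            obtain ⟨k, hkeq⟩ : ∃ k : Nat, (PySem.Str.split₀ kv'.1).length = k + 1 :=
              ⟨(PySem.Str.split₀ kv'.1).length - 1, by omega⟩
            have hkk₀ : k < k₀ := by omega
            have hfalse := hprev' k hkk₀
            rw [show ((PySem.Str.split₀ kv'.1).length : Int) = ((k : Int) + 1) by omega,
              PySem.List.slice_to _ (by omega), show ((k : Int) + 1).toNat = k + 1 by omega] at h3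
            rw [hq] at hfalse
            simp only [decide_eq_false_iff_not] at hfalse
            exact hfalse (h3 ▸ List.mem_map.mpr ⟨kv', hkv', rfl⟩)
        · exact Or.inl (List.mem_filterMap.mpr ⟨kv, hkv, hcand⟩)
        · intro m hm; cases hm
      have halt : key_exists_alt key dictionary = (true, some (PySem.Str.join " " (kp.take (k₀ + 1)))) := by
        unfold key_exists_alt
        rw [if_neg hnotfalse]
        show (match keBestFold kp none dictionary with
          | none => (false, none)
          | some (_, s) => (true, some s)) = _
        rw [fold_char kp dictionary none (fun m s h => by cases h)]
        simp only [Option.map_none]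
        rw [hmin]
        show (true, some _) = (true, some _)
        rw [PySem.List.slice_to _ (by omega), show ((k₀ : Int) + 1).toNat = k₀ + 1 by omega]
      rw [halt]
      simp only [Option.map_some]
      show (true, some _) = (true, some _)
      rw [PySem.List.slice_to _ (by omega), show ((k₀ : Int) + 1).toNat = k₀ + 1 by omega]
  · have hsep' : PySem.Str.isIn " - " key = false := by
      cases h : PySem.Str.isIn " - " key
      · rfl
      · exact absurd h hsep
    unfold key_exists key_exists_alt
    rw [if_pos hsep', outer_noSep key _ dictionary hsep']
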